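-- pv_equiv track=rewrite | github.com/BigBrou/Algorithm | hash/hash3.py | solution
-- ===== SOURCE A (Python) =====
-- def solution(clothes):
--     clothes_dict = dict()
--     clothes_list = list()
--
--     # arrange clothes
--     for idx in range(len(clothes)):
--         clothes_each = clothes[idx][0]
--         clothes_category = clothes[idx][-1]
--
--         if clothes_category not in clothes_dict:
--             clothes_dict[clothes_category] = [clothes_each]
--             clothes_list.append(clothes_category)
--         else:
--             if clothes_each not in clothes_dict[clothes_category]:
--                 clothes_dict[clothes_category].append(clothes_each)
--
--     # check clothes category count
--     total_clothes_count_list = list()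
--
--     for idx in range(len(clothes_list)):
--         clothes_category = clothes_list[idx]
--         clothes_category_count = len(clothes_dict[clothes_category])
--
--         total_clothes_count_list.append(clothes_category_count)
--
--     # combinations
--     total_combinations = 1
--
--     for count in total_clothes_count_list:
--         total_combinations *= (count + 1)
--
--     total_combinations = total_combinations -1
--     return total_combinations
-- ===== SOURCE B (Python) =====
-- def solution(clothes):
--     # Dedup list of (item, category) pairs, then a recursive partition that
--     # peels off one category at a time, multiplying (group size + 1).
--     pairs = []
--     for c in clothes:
--         p = (c[0], c[-1])
--         if p not in pairs:
--             pairs.append(p)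
--
--     def prod(ps):
--         if not ps:
--             return 1
--         cat = ps[0][1]
--         same = [q for q in ps if q[1] == cat]
--         rest = [q for q in ps if q[1] != cat]
--         return (len(same) + 1) * prod(rest)
--
--     return prod(pairs) - 1
-- ===== Notes on version B (the rewrite author's own statement) =====
-- stated objective: alternative
-- what changed: Replaces A's dict-of-lists keyed by category plus a key-order list and two extra counting passes by a flat dedup list of (item, category) pairs followed by a quicksort-style recursive partition that peels one category off at a time, multiplying (group size + 1); no dictionary at all.
import Mathlib
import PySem

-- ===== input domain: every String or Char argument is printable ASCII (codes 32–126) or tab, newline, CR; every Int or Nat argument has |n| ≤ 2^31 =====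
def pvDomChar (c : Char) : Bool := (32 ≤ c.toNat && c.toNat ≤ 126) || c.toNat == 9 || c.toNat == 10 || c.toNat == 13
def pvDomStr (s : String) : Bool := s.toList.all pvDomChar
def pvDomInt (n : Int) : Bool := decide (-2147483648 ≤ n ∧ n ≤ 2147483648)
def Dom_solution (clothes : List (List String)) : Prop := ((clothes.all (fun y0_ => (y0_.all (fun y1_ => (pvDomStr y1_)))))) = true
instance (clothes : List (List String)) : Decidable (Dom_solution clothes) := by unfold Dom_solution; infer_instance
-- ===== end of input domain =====

-- B replaces A's dict-of-lists + key-order list + two extra passes by a flat dedup list of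
-- (item, category) pairs and a recursive partition peeling one category at a time (alternative).

-- ===== PORT A =====
def solution (clothes : List (List String)) : Int :=
  let arranged :=
    (PySem.List.pyRange 0 (PySem.List.len clothes) 1).foldl
      (fun (st : PySem.Dict String (List String) × List String) idx =>
        let c := PySem.List.pyGetD clothes idx []
        let each := PySem.List.pyGetD c 0 ""
        let cat := PySem.List.pyGetD c (-1) ""
        if ¬ st.1.contains cat then
          (st.1.insert cat [each], st.2 ++ [cat])
        else
          if each ∈ st.1.getD cat [] then st
          else (st.1.insert cat (st.1.getD cat [] ++ [each]), st.2))
      (PySem.Dict.empty, [])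
  let countList :=
    (PySem.List.pyRange 0 (PySem.List.len arranged.2) 1).foldl
      (fun (acc : List Int) idx =>
        let cat := PySem.List.pyGetD arranged.2 idx ""
        acc ++ [((arranged.1.getD cat []).length : Int)])
      []
  (countList.foldl (fun t n => t * (n + 1)) 1) - 1

-- ===== PORT B =====
-- the inner recursive 'prod' of Source B
def prodB : List (String × String) → Int
  | [] => 1
  | p :: ps =>
    let cat := p.2
    let same := (p :: ps).filter (fun q => q.2 == cat)
    let rest := (p :: ps).filter (fun q => q.2 != cat)
    ((same.length : Int) + 1) * prodB rest
termination_by ps => ps.length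
decreasing_by
  simp only [List.filter_cons, bne_self_eq_false, List.length_cons]
  exact Nat.lt_succ_of_le (List.length_filter_le _ _)

def solution_alt (clothes : List (List String)) : Int :=
  let pairs :=
    clothes.foldl
      (fun (acc : List (String × String)) c =>
        let p := (PySem.List.pyGetD c 0 "", PySem.List.pyGetD c (-1) "")
        if p ∈ acc then acc else acc ++ [p])
      []
  prodB pairs - 1

-- ===== PRECONDITION & SPEC =====
-- Pre_ excludes exactly the inputs with an empty inner list, on which A (and B) raise IndexError at c[0].
def Pre_solution (clothes : List (List String)) : Prop := (clothes.all (fun c => !c.isEmpty)) = true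
instance (clothes : List (List String)) : Decidable (Pre_solution clothes) := by unfold Pre_solution; infer_instance
def pvWitness_solution : List (List String) := [["a", "hat"], ["b", "hat"], ["c", "top"]]

def Spec_solution (clothes : List (List String)) (out : Int) : Prop := out = solution_alt clothes
instance (clothes : List (List String)) (out : Int) : Decidable (Spec_solution clothes out) := by unfold Spec_solution; infer_instance

-- ===== CLAIM (what is proved, stated in full; the proofs are below) =====
def Claim_equal_solution : Prop := ∀ (clothes : List (List String)), Dom_solution clothes → Pre_solution clothes → Spec_solution clothes (solution clothes)

-- ===== LEMMAS AND PROOFS =====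

-- A's loop body, named for the proofs (definitionally the port's lambda).
def stepA (st : PySem.Dict String (List String) × List String) (c : List String) :
    PySem.Dict String (List String) × List String :=
  let each := PySem.List.pyGetD c 0 ""
  let cat := PySem.List.pyGetD c (-1) ""
  if ¬ st.1.contains cat then
    (st.1.insert cat [each], st.2 ++ [cat])
  else
    if each ∈ st.1.getD cat [] then st
    else (st.1.insert cat (st.1.getD cat [] ++ [each]), st.2)

-- B's dedup loop body.
def stepP (acc : List (String × String)) (c : List String) : List (String × String) :=
  let p := (PySem.List.pyGetD c 0 "", PySem.List.pyGetD c (-1) "")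
  if p ∈ acc then acc else acc ++ [p]

def foldA (clothes : List (List String)) : PySem.Dict String (List String) × List String :=
  clothes.foldl stepA (PySem.Dict.empty, [])

def foldP (clothes : List (List String)) : List (String × String) :=
  clothes.foldl stepP []

-- A's result characterized through stepA (the pyRange index loops removed).
theorem solA_eq (clothes : List (List String)) :
    solution clothes =
      (((foldA clothes).2.map (fun cat => (((foldA clothes).1.getD cat []).length : Int))).foldl
        (fun t n => t * (n + 1)) 1) - 1 := by
  have h : (PySem.List.pyRange 0 (PySem.List.len clothes) 1).foldl
      (fun st j => stepA st (PySem.List.pyGetD clothes j [])) (PySem.Dict.empty, ([] : List String))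
      = foldA clothes :=
    PySem.List.foldl_pyRange_zero_pyGetD clothes ([] : List String) stepA _
  calc solution clothes
      = (((PySem.List.pyRange 0 (PySem.List.len ((PySem.List.pyRange 0 (PySem.List.len clothes) 1).foldl
            (fun st j => stepA st (PySem.List.pyGetD clothes j [])) (PySem.Dict.empty, ([] : List String))).2) 1).foldl
            (fun (acc : List Int) j => acc ++ [((((PySem.List.pyRange 0 (PySem.List.len clothes) 1).foldl
              (fun st j => stepA st (PySem.List.pyGetD clothes j [])) (PySem.Dict.empty, ([] : List String))).1.getD
                (PySem.List.pyGetD ((PySem.List.pyRange 0 (PySem.List.len clothes) 1).foldl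
                  (fun st j => stepA st (PySem.List.pyGetD clothes j [])) (PySem.Dict.empty, ([] : List String))).2 j "") []).length : Int)]) []).foldl
            (fun t n => t * (n + 1)) 1) - 1 := rfl
    _ = (((PySem.List.pyRange 0 (PySem.List.len (foldA clothes).2) 1).foldl
            (fun (acc : List Int) j => acc ++ [(((foldA clothes).1.getD
              (PySem.List.pyGetD (foldA clothes).2 j "") []).length : Int)]) []).foldl
            (fun t n => t * (n + 1)) 1) - 1 := by rw [h]
    _ = ((((foldA clothes).2.map (fun cat => (((foldA clothes).1.getD cat []).length : Int))).foldl
            (fun t n => t * (n + 1)) 1) - 1) := by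
          rw [PySem.List.foldl_pyRange_zero_pyGetD (foldA clothes).2 ""
              (fun (acc : List Int) cat => acc ++ [(((foldA clothes).1.getD cat []).length : Int)]) []]
          rw [PySem.List.foldl_append_singleton_eq_map, List.nil_append]

theorem solB_eq (clothes : List (List String)) :
    solution_alt clothes = prodB (foldP clothes) - 1 := rfl

-- membership in a pair list through its per-category projection
theorem mem_filter_map_fst (pairs : List (String × String)) (e c : String) :
    e ∈ (pairs.filter (fun q => q.2 == c)).map Prod.fst ↔ (e, c) ∈ pairs := by
  constructor
  · intro h
    obtain ⟨q, hq, he⟩ := List.mem_map.mp h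
    obtain ⟨hqm, hqc⟩ := List.mem_filter.mp hq
    have : q = (e, c) := by
      cases q; simp_all
    exact this ▸ hqm
  · intro h
    exact List.mem_map.mpr ⟨(e, c), List.mem_filter.mpr ⟨h, by simp⟩, rfl⟩

-- The joint invariant tying A's (dict, key list) to B's dedup pair list.
def InvAB (d : PySem.Dict String (List String)) (l : List String)
    (pairs : List (String × String)) : Prop :=
  l = d.keys ∧ d.keys.Nodup ∧
  (∀ c, (pairs.filter (fun q => q.2 == c)).map Prod.fst = d.getD c []) ∧
  (∀ c, c ∈ d.keys ↔ c ∈ pairs.map Prod.snd)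

theorem inv_step (d : PySem.Dict String (List String)) (l : List String)
    (pairs : List (String × String)) (c : List String) (h : InvAB d l pairs) :
    InvAB (stepA (d, l) c).1 (stepA (d, l) c).2 (stepP pairs c) := by
  obtain ⟨h1, h2, h3, h4⟩ := h
  set each := PySem.List.pyGetD c 0 "" with heach
  set cat := PySem.List.pyGetD c (-1) "" with hcat
  have hmemiff : ∀ e c', (e, c') ∈ pairs ↔ e ∈ d.getD c' [] := by
    intro e c'; rw [← h3 c']; exact (mem_filter_map_fst pairs e c').symm
  by_cases hc : d.contains cat
  · by_cases hm : each ∈ d.getD cat []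
    · have hp : (each, cat) ∈ pairs := (hmemiff each cat).mpr hm
      have ea : stepA (d, l) c = (d, l) := by simp [stepA, ← heach, ← hcat, hc, hm]
      have eb : stepP pairs c = pairs := by simp [stepP, ← heach, ← hcat, hp]
      rw [ea, eb]; exact ⟨h1, h2, h3, h4⟩
    · have hp : (each, cat) ∉ pairs := fun hx => hm ((hmemiff each cat).mp hx)
      have ea : stepA (d, l) c = (d.insert cat (d.getD cat [] ++ [each]), l) := by
        simp [stepA, ← heach, ← hcat, hc, hm]
      have eb : stepP pairs c = pairs ++ [(each, cat)] := by
        simp [stepP, ← heach, ← hcat, hp]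
      rw [ea, eb]
      refine ⟨?_, ?_, ?_, ?_⟩
      · rw [h1, PySem.Dict.keys_insert_of_contains d _ hc]
      · rw [PySem.Dict.keys_insert_of_contains d _ hc]; exact h2
      · intro c'
        rw [List.filter_append, List.map_append, h3 c', PySem.Dict.getD_insert]
        by_cases he : c' = cat
        · subst he; simp
        · simp [he, Ne.symm he]
      · intro c'
        rw [PySem.Dict.keys_insert_of_contains d _ hc, List.map_append]
        by_cases he : c' = cat
        · subst he
          constructor
          · intro _; simp
          · intro _; rw [← PySem.Dict.contains_iff_mem_keys]; exact hc
        · simp [he, h4 c']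
  · have hcf : d.contains cat = false := by simpa using hc
    have hd : d.getD cat [] = [] := PySem.Dict.getD_of_not_contains d _ hcf
    have hp : (each, cat) ∉ pairs := fun hx => by
      have := (hmemiff each cat).mp hx; rw [hd] at this; simp at this
    have hnotmem : cat ∉ d.keys := by
      rw [← PySem.Dict.contains_iff_mem_keys]; simpa using hc
    have ea : stepA (d, l) c = (d.insert cat [each], l ++ [cat]) := by
      simp [stepA, ← heach, ← hcat, hc]
    have eb : stepP pairs c = pairs ++ [(each, cat)] := by
      simp [stepP, ← heach, ← hcat, hp]
    have hfilcat : pairs.filter (fun q => q.2 == cat) = [] := by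
      have := h3 cat; rw [hd] at this
      exact List.map_eq_nil_iff.mp this
    rw [ea, eb]
    refine ⟨?_, ?_, ?_, ?_⟩
    · rw [h1, PySem.Dict.keys_insert_of_not_contains d _ hcf]
    · rw [PySem.Dict.keys_insert_of_not_contains d _ hcf]
      refine List.Nodup.append h2 (List.nodup_singleton _) ?_
      simpa [List.disjoint_singleton] using hnotmem
    · intro c'
      rw [List.filter_append, List.map_append, h3 c', PySem.Dict.getD_insert]
      by_cases he : c' = cat
      · subst he; simp [hd]
      · simp [he, Ne.symm he]
    · intro c'
      rw [PySem.Dict.keys_insert_of_not_contains d _ hcf, List.map_append]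
      by_cases he : c' = cat
      · subst he; simp
      · simp [he, h4 c']

theorem inv_fold (xs : List (List String)) (d : PySem.Dict String (List String))
    (l : List String) (pairs : List (String × String)) (h : InvAB d l pairs) :
    InvAB (xs.foldl stepA (d, l)).1 (xs.foldl stepA (d, l)).2 (xs.foldl stepP pairs) := by
  induction xs generalizing d l pairs with
  | nil => exact h
  | cons c xs ih =>
    simp only [List.foldl_cons]
    have hstep := inv_step d l pairs c h
    have e1 : stepA (d, l) c = ((stepA (d, l) c).1, (stepA (d, l) c).2) := rfl
    rw [e1]
    exact ih _ _ _ hstep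

-- A's accumulator loop is a product.
theorem foldl_mul_succ (l : List Int) (t : Int) :
    l.foldl (fun t n => t * (n + 1)) t = t * (l.map (fun n => n + 1)).prod := by
  induction l generalizing t with
  | nil => simp
  | cons n l ih => simp [List.foldl_cons, ih, mul_assoc]

-- B's recursion is the product over the category finset of (group size + 1).
theorem prodB_eq : ∀ (n : Nat) (ps : List (String × String)), ps.length ≤ n →
    prodB ps = ∏ c ∈ (ps.map Prod.snd).toFinset,
      (((ps.filter (fun q => q.2 == c)).length : Int) + 1) := by
  intro n
  induction n with
  | zero =>
    intro ps h
    have : ps = [] := List.length_eq_zero_iff.mp (Nat.le_zero.mp h)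
    subst this; simp [prodB]
  | succ n ih =>
    intro ps h
    match ps with
    | [] => simp [prodB]
    | p :: ps' =>
      rw [prodB]
      have hrest : (p :: ps').filter (fun q => q.2 != p.2) = ps'.filter (fun q => q.2 != p.2) := by
        simp
      have hlen : ((p :: ps').filter (fun q => q.2 != p.2)).length ≤ n := by
        rw [hrest]
        exact le_trans (List.length_filter_le _ _) (Nat.le_of_succ_le_succ h)
      rw [ih _ hlen]
      set rest := (p :: ps').filter (fun q => q.2 != p.2) with hrestdef
      have hS : (rest.map Prod.snd).toFinset = ((p :: ps').map Prod.snd).toFinset.erase p.2 := by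
        ext c
        simp only [List.mem_toFinset, List.mem_map, Finset.mem_erase, hrestdef, List.mem_filter,
          bne_iff_ne, ne_eq]
        constructor
        · rintro ⟨q, ⟨hq, hne⟩, rfl⟩
          exact ⟨hne, q, hq, rfl⟩
        · rintro ⟨hne, q, hq, rfl⟩
          exact ⟨q, ⟨hq, hne⟩, rfl⟩
      have hmemcat : p.2 ∈ ((p :: ps').map Prod.snd).toFinset := by simp
      rw [hS]
      have hfil : ∀ c ∈ ((p :: ps').map Prod.snd).toFinset.erase p.2,
          (((rest.filter (fun q => q.2 == c)).length : Int) + 1)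
            = ((((p :: ps').filter (fun q => q.2 == c)).length : Int) + 1) := by
        intro c hcm
        have hne : c ≠ p.2 := (Finset.mem_erase.mp hcm).1
        have hf : rest.filter (fun q => q.2 == c) = (p :: ps').filter (fun q => q.2 == c) := by
          rw [hrestdef, List.filter_filter]
          apply List.filter_congr
          intro q _
          by_cases hq : q.2 = c
          · simp [hq, hne]
          · simp [hq]
        rw [hf]
      rw [Finset.prod_congr rfl hfil]
      rw [← Finset.mul_prod_erase ((p :: ps').map Prod.snd).toFinset _ hmemcat]

-- ===== VERDICT (by name: the statement is the Claim_ definition above) =====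
theorem solution_spec : Claim_equal_solution := by
  intro clothes _ _
  unfold Spec_solution
  rw [solA_eq, solB_eq]
  obtain ⟨h1, h2, h3, h4⟩ : InvAB (foldA clothes).1 (foldA clothes).2 (foldP clothes) := by
    apply inv_fold
    exact ⟨rfl, List.nodup_nil, fun c => rfl, fun c => by simp [PySem.Dict.empty]⟩
  rw [foldl_mul_succ, one_mul, List.map_map]
  rw [prodB_eq (foldP clothes).length _ le_rfl]
  have hkeys : ((foldP clothes).map Prod.snd).toFinset = (foldA clothes).2.toFinset := by
    ext c; rw [List.mem_toFinset, List.mem_toFinset, h1, h4 c]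
  rw [hkeys]
  have hnd : (foldA clothes).2.Nodup := h1 ▸ h2
  rw [← List.prod_toFinset _ hnd]
  congr 1
  apply Finset.prod_congr rfl
  intro c _
  have := h3 c
  have hlen : ((foldP clothes).filter (fun q => q.2 == c)).length
      = ((foldA clothes).1.getD c []).length := by
    rw [← this, List.length_map]
  simp [Function.comp, hlen]
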